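-- pv_equiv track=rewrite | github.com/parveenchahal/DS-Algo | make_sum_divisible_by_p.py | minSubarray
-- ===== SOURCE A (Python) =====
-- from typing import List
--
-- def minSubarray(nums: List[int], p: int) -> int:
--     n = len(nums)
--     s = sum(nums)
--     r = s % p
--     if r == 0:
--         return 0
--     sum_so_far = 0
--     m = {0: -1}
--     MAX = n
--     result = MAX
--     for i in range(n):
--         sum_so_far += nums[i]
--         sum_so_far = sum_so_far % p
--         x = sum_so_far - r
--         if x < 0:
--             x += p
--         if x in m:
--             result = min(result, i - m[x])
--         m[sum_so_far] = i
--     return result if result != MAX else -1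
-- ===== SOURCE B (Python) =====
-- from typing import List
--
-- def minSubarray(nums: List[int], p: int) -> int:
--     n = len(nums)
--     r = sum(nums) % p
--     if r == 0:
--         return 0
--     pre = [0]
--     for v in nums:
--         pre.append((pre[-1] + v) % p)
--     best = n
--     for i in range(n):
--         target = (pre[i + 1] - r) % p
--         a = i
--         while a >= 0:
--             if pre[a] == target:
--                 best = min(best, i + 1 - a)
--                 break
--             a -= 1
--     return best if best < n else -1
-- ===== Notes on version B (the rewrite author's own statement) =====
-- stated objective: simpler
-- what changed: Replaces the running-sum-plus-hashmap (last-seen-index dictionary with hand-rolled residue renormalization) by a precomputed prefix-residue array and, for each end index, an explicit backward scan for the nearest matching prefix residue, with no dictionary at all.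
-- outside the precondition, e.g. on minSubarray([1, 2], 0): A raises ZeroDivisionError, B raises ZeroDivisionError; on minSubarray([-3, -2, -1], -4): A returns -1, B returns 1
import Mathlib
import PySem

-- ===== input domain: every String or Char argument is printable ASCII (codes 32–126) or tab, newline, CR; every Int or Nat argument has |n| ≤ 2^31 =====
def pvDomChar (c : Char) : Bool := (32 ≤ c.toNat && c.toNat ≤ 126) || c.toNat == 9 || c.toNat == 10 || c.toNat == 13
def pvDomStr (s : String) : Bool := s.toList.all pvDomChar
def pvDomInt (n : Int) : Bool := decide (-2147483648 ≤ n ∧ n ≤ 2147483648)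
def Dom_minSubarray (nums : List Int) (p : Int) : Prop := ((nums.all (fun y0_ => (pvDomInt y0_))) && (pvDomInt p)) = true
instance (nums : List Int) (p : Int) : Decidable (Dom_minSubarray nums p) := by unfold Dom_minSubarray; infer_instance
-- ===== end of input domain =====

-- B replaces A's running-sum + last-seen-index dictionary by a prefix-residue array with an
-- explicit backward scan per end index (no dictionary); simpler, not faster (O(n^2) vs O(n)).


-- ===== PORT A =====
def minSubarray (nums : List Int) (p : Int) : Int :=
  let n := nums.length
  let s := nums.sum
  let r := PySem.Int.mod s p
  if r = 0 then 0
  else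
    let st := (PySem.List.pyRange 0 n 1).foldl
      (fun (st : Int × PySem.Dict Int Int × Int) i =>
        let sum_so_far := PySem.Int.mod (st.1 + PySem.List.pyGetD nums i 0) p
        let x0 := sum_so_far - r
        let x := if x0 < 0 then x0 + p else x0
        let result := match st.2.1.get? x with
          | some v => min st.2.2 (i - v)
          | none => st.2.2
        (sum_so_far, st.2.1.insert sum_so_far i, result))
      (0, (PySem.Dict.empty).insert 0 (-1), (n : Int))
    if st.2.2 ≠ (n : Int) then st.2.2 else -1

-- ===== PORT B =====
-- backward scan 'a = i; while a >= 0: if pre[a] == target: ...; break; a -= 1'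
def scanDown (pre : List Int) (target : Int) : Nat → Option Nat
  | 0 => if pre.getD 0 0 = target then some 0 else none
  | a + 1 => if pre.getD (a + 1) 0 = target then some (a + 1) else scanDown pre target a

def minSubarray_alt (nums : List Int) (p : Int) : Int :=
  let n := nums.length
  let r := PySem.Int.mod nums.sum p
  if r = 0 then 0
  else
    let pre := nums.foldl (fun pre v => pre ++ [PySem.Int.mod (PySem.List.pyGetD pre (-1) 0 + v) p]) [(0 : Int)]
    let best := (List.range n).foldl
      (fun (best : Int) i =>
        let target := PySem.Int.mod (pre.getD (i + 1) 0 - r) p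
        match scanDown pre target i with
        | some a => min best ((i : Int) + 1 - (a : Int))
        | none => best)
      (n : Int)
    if best < (n : Int) then best else -1

-- ===== PRECONDITION & SPEC =====
-- Pre_ excludes p = 0, on which A raises ZeroDivisionError, and p < 0, an unspecified corner
-- ("divisible by a negative p") where A's hand-rolled residue renormalization (x += p) and B's
-- plain Python modulo are two arbitrary conventions that can disagree.
def Pre_minSubarray (nums : List Int) (p : Int) : Prop := 0 < p
instance (nums : List Int) (p : Int) : Decidable (Pre_minSubarray nums p) := by unfold Pre_minSubarray; infer_instance
def pvWitness_minSubarray : List Int × Int := ([1, 2, 3], 5)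

def Spec_minSubarray (nums : List Int) (p : Int) (out : Int) : Prop := out = minSubarray_alt nums p
instance (nums : List Int) (p : Int) (out : Int) : Decidable (Spec_minSubarray nums p out) := by unfold Spec_minSubarray; infer_instance

-- ===== CLAIM (what is proved, stated in full; the proofs are below) =====
def Claim_equal_minSubarray : Prop := ∀ (nums : List Int) (p : Int), Dom_minSubarray nums p → Pre_minSubarray nums p → Spec_minSubarray nums p (minSubarray nums p)

-- ===== LEMMAS AND PROOFS =====

-- prefix residues: preF nums p k = (sum of first k elements) % p, computed incrementally
def preF (nums : List Int) (p : Int) : Nat → Int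
  | 0 => 0
  | k + 1 => PySem.Int.mod (preF nums p k + nums.getD k 0) p

-- the prefix list built by port B's first loop
def buildPreP (nums : List Int) (p : Int) : List Int :=
  nums.foldl (fun pre v => pre ++ [PySem.Int.mod (PySem.List.pyGetD pre (-1) 0 + v) p]) [(0 : Int)]

-- A's loop after k iterations (indices recast to Nat)
def stA (nums : List Int) (p r : Int) (k : Nat) : Int × PySem.Dict Int Int × Int :=
  (List.range k).foldl
    (fun (st : Int × PySem.Dict Int Int × Int) (j : Nat) =>
      let i : Int := (j : Int)
      let sum_so_far := PySem.Int.mod (st.1 + PySem.List.pyGetD nums i 0) p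
      let x0 := sum_so_far - r
      let x := if x0 < 0 then x0 + p else x0
      let result := match st.2.1.get? x with
        | some v => min st.2.2 (i - v)
        | none => st.2.2
      (sum_so_far, st.2.1.insert sum_so_far i, result))
    (0, (PySem.Dict.empty).insert 0 (-1), (nums.length : Int))

-- index stored by A's dict for a matched prefix position
def idxVal : Option Nat → Option Int
  | some a => some ((a : Int) - 1)
  | none => none

-- B's loop after k iterations
def bestB (nums : List Int) (p r : Int) (k : Nat) : Int :=
  (List.range k).foldl
    (fun (best : Int) i =>
      let target := PySem.Int.mod ((buildPreP nums p).getD (i + 1) 0 - r) p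
      match scanDown (buildPreP nums p) target i with
      | some a => min best ((i : Int) + 1 - (a : Int))
      | none => best)
    (nums.length : Int)

lemma preF_append (nums : List Int) (v p : Int) :
    ∀ k, k ≤ nums.length → preF (nums ++ [v]) p k = preF nums p k := by
  intro k
  induction k with
  | zero => intro _; rfl
  | succ k ih =>
    intro hk
    simp only [preF, ih (by omega)]
    rw [List.getD_append nums [v] 0 k (by omega)]

lemma buildPreP_eq (p : Int) :
    ∀ nums : List Int, buildPreP nums p = (List.range (nums.length + 1)).map (preF nums p) := by
  intro nums
  induction nums using List.reverseRecOn with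
  | nil => simp [buildPreP, preF]
  | append_singleton nums v ih =>
    have hsplit : buildPreP (nums ++ [v]) p
        = buildPreP nums p ++ [PySem.Int.mod (PySem.List.pyGetD (buildPreP nums p) (-1) 0 + v) p] := by
      simp [buildPreP, List.foldl_append]
    rw [hsplit, ih]
    have hmap : (List.range (nums.length + 1)).map (preF nums p)
        = (List.range nums.length).map (preF nums p) ++ [preF nums p nums.length] := by
      rw [List.range_succ, List.map_append, List.map_singleton]
    have hlast : PySem.List.pyGetD ((List.range (nums.length + 1)).map (preF nums p)) (-1) 0
        = preF nums p nums.length := by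
      rw [hmap, PySem.List.pyGetD_neg_one_append_singleton]
    rw [hlast]
    have hlen : (nums ++ [v]).length = nums.length + 1 := by simp
    conv_rhs => rw [hlen, List.range_succ, List.map_append, List.map_singleton]
    congr 1
    · apply List.map_congr_left
      intro k hk
      exact (preF_append nums v p k (Nat.le_of_lt_succ (List.mem_range.mp hk))).symm
    · have hgv : (nums ++ [v]).getD nums.length 0 = v := by
        simp [List.getD]
      simp only [preF, preF_append nums v p nums.length le_rfl, hgv]

lemma buildPreP_getD (nums : List Int) (p : Int) (k : Nat) (hk : k ≤ nums.length) :
    (buildPreP nums p).getD k 0 = preF nums p k := by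
  rw [buildPreP_eq]
  simp [List.getD, Nat.lt_succ_of_le hk]

lemma preF_bounds (nums : List Int) (p : Int) (hp : 0 < p) (k : Nat) :
    0 ≤ preF nums p k ∧ preF nums p k < p := by
  cases k with
  | zero => exact ⟨le_refl 0, hp⟩
  | succ k =>
    simp only [preF, PySem.Int.mod_eq_emod_of_pos hp]
    exact ⟨Int.emod_nonneg _ (by omega), Int.emod_lt_of_pos _ hp⟩

-- A's conditional renormalization equals Python's % for a difference of two residues
lemma ifmod (p : Int) (hp : 0 < p) (a : Int) (h1 : -p < a) (h2 : a < p) :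
    (if a < 0 then a + p else a) = PySem.Int.mod a p := by
  rw [PySem.Int.mod_eq_emod_of_pos hp]
  split_ifs with h
  · rw [← Int.add_mul_emod_self_left (a := a) (b := p) (c := 1), mul_one,
      Int.emod_eq_of_lt (by omega) (by omega)]
  · rw [Int.emod_eq_of_lt (by omega) h2]

lemma bestB_le (nums : List Int) (p r : Int) (k : Nat) :
    bestB nums p r k ≤ (nums.length : Int) := by
  induction k with
  | zero => exact le_refl _
  | succ k ih =>
    simp only [bestB, List.range_succ, List.foldl_append, List.foldl_cons, List.foldl_nil] at ih ⊢
    cases scanDown (buildPreP nums p) (PySem.Int.mod ((buildPreP nums p).getD (k + 1) 0 - r) p) k with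
    | none => exact ih
    | some a => exact le_trans (min_le_left _ _) ih

def stAraw (nums : List Int) (p r : Int) : Int × PySem.Dict Int Int × Int :=
  (PySem.List.pyRange 0 (nums.length) 1).foldl
    (fun (st : Int × PySem.Dict Int Int × Int) i =>
      let sum_so_far := PySem.Int.mod (st.1 + PySem.List.pyGetD nums i 0) p
      let x0 := sum_so_far - r
      let x := if x0 < 0 then x0 + p else x0
      let result := match st.2.1.get? x with
        | some v => min st.2.2 (i - v)
        | none => st.2.2
      (sum_so_far, st.2.1.insert sum_so_far i, result))
    (0, (PySem.Dict.empty).insert 0 (-1), (nums.length : Int))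

lemma stAraw_eq (nums : List Int) (p r : Int) : stAraw nums p r = stA nums p r nums.length := by
  unfold stAraw stA
  rw [PySem.List.pyRange_zero_natCast, List.foldl_map]

lemma loop_inv (nums : List Int) (p r : Int) (hp : 0 < p) (hr0 : 0 ≤ r) (hrp : r < p) :
    ∀ k, k ≤ nums.length →
      (stA nums p r k).1 = preF nums p k
      ∧ (∀ x, (stA nums p r k).2.1.get? x
            = idxVal (scanDown (buildPreP nums p) x k))
      ∧ (stA nums p r k).2.2 = bestB nums p r k := by
  intro k
  induction k with
  | zero =>
    intro _
    refine ⟨rfl, ?_, rfl⟩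
    intro x
    simp only [stA, List.range_zero, List.foldl_nil, scanDown,
      buildPreP_getD nums p 0 (Nat.zero_le _)]
    rw [PySem.Dict.get?_insert]
    have h0 : preF nums p 0 = 0 := rfl
    rw [h0]
    split_ifs with h h' h'
    · simp [idxVal]
    · omega
    · omega
    · simp [idxVal, PySem.Dict.get?_empty]
  | succ k ih =>
    intro hk
    obtain ⟨h1, h2, h3⟩ := ih (by omega)
    have hstep : stA nums p r (k + 1) =
      (fun (st : Int × PySem.Dict Int Int × Int) (j : Nat) =>
        let i : Int := (j : Int)
        let sum_so_far := PySem.Int.mod (st.1 + PySem.List.pyGetD nums i 0) p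
        let x0 := sum_so_far - r
        let x := if x0 < 0 then x0 + p else x0
        let result := match st.2.1.get? x with
          | some v => min st.2.2 (i - v)
          | none => st.2.2
        (sum_so_far, st.2.1.insert sum_so_far i, result)) (stA nums p r k) k := by
      simp only [stA, List.range_succ, List.foldl_append, List.foldl_cons, List.foldl_nil]
    have hsum : PySem.Int.mod ((stA nums p r k).1 + PySem.List.pyGetD nums ((k : Nat) : Int) 0) p
        = preF nums p (k + 1) := by
      rw [h1, PySem.List.pyGetD_natCast]
      rfl
    have hb := preF_bounds nums p hp (k + 1)
    have hx : (if preF nums p (k + 1) - r < 0 then preF nums p (k + 1) - r + p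
          else preF nums p (k + 1) - r)
        = PySem.Int.mod (preF nums p (k + 1) - r) p :=
      ifmod p hp _ (by omega) (by omega)
    have htarget : (buildPreP nums p).getD (k + 1) 0 = preF nums p (k + 1) :=
      buildPreP_getD nums p (k + 1) hk
    refine ⟨?_, ?_, ?_⟩
    · rw [hstep]; exact hsum
    · intro x
      rw [hstep]
      simp only [hsum]
      rw [PySem.Dict.get?_insert]
      simp only [scanDown, htarget]
      split_ifs with h h' h'
      · simp only [idxVal, Option.some.injEq]
        omega
      · omega
      · omega
      · exact h2 x
    · rw [hstep]
      simp only [hsum, hx, h2]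
      have hbB : bestB nums p r (k + 1) =
        (fun (best : Int) (i : Nat) =>
          let target := PySem.Int.mod ((buildPreP nums p).getD (i + 1) 0 - r) p
          match scanDown (buildPreP nums p) target i with
          | some a => min best ((i : Int) + 1 - (a : Int))
          | none => best) (bestB nums p r k) k := by
        simp only [bestB, List.range_succ, List.foldl_append, List.foldl_cons, List.foldl_nil]
      rw [hbB]
      simp only [htarget]
      cases scanDown (buildPreP nums p) (PySem.Int.mod (preF nums p (k + 1) - r) p) k with
      | none => simpa [idxVal] using h3
      | some a =>
        simp only [idxVal, h3]
        congr 1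
        omega

-- ===== VERDICT (by name: the statement is the Claim_ definition above) =====
theorem minSubarray_spec : Claim_equal_minSubarray := by
  intro nums p _ hp
  unfold Pre_minSubarray at hp
  unfold Spec_minSubarray
  have hA : minSubarray nums p = (if PySem.Int.mod nums.sum p = 0 then 0 else
      if (stAraw nums p (PySem.Int.mod nums.sum p)).2.2 ≠ (nums.length : Int)
      then (stAraw nums p (PySem.Int.mod nums.sum p)).2.2 else -1) := rfl
  have hB : minSubarray_alt nums p = (if PySem.Int.mod nums.sum p = 0 then 0 else
      if bestB nums p (PySem.Int.mod nums.sum p) nums.length < (nums.length : Int)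
      then bestB nums p (PySem.Int.mod nums.sum p) nums.length else -1) := rfl
  rw [hA, hB, stAraw_eq]
  set r := PySem.Int.mod nums.sum p with hr
  by_cases h0 : r = 0
  · simp [h0]
  · rw [if_neg h0, if_neg h0]
    have hr0 : 0 ≤ r := by
      rw [hr, PySem.Int.mod_eq_emod_of_pos hp]; exact Int.emod_nonneg _ (by omega)
    have hrp : r < p := by
      rw [hr, PySem.Int.mod_eq_emod_of_pos hp]; exact Int.emod_lt_of_pos _ hp
    obtain ⟨-, -, h3⟩ := loop_inv nums p r hp hr0 hrp nums.length le_rfl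
    rw [h3]
    have hle := bestB_le nums p r nums.length
    split_ifs with ha hb hb
    · rfl
    · omega
    · omega
    · rfl
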